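-- pv_equiv track=rewrite | github.com/shishir-insane/karma-aligns | server/astrology/dasha.py | _kcd_ad_order
-- ===== SOURCE A (Python) =====
-- def _kcd_end_and_restart_signs(group_key: str, deha: str, jeeva: str) -> tuple[str, str]:
--     """
--     Antardasa sequence rule (Saravali): proceed from MD lord up to the 'last' of the pada group,
--     then continue from the 'first'. Last = Jeeva for Savya; Deha for Apsavya. First = the other.
--     :contentReference[oaicite:2]{index=2}
--     """
--     is_savya = group_key.startswith("S")
--     end_sign = jeeva if is_savya else deha
--     restart_sign = deha if is_savya else jeeva
--     return end_sign, restart_sign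
--
-- def _kcd_ad_order(seq: list[str], md_sign: str, group_key: str, deha: str, jeeva: str, count: int = 8) -> list[str]:
--     """Build Antardasa (or Pratyantara) order of 'count' signs."""
--     n = len(seq)
--     midx = seq.index(md_sign)
--     end_sign, restart = _kcd_end_and_restart_signs(group_key, deha, jeeva)
--     eidx = seq.index(end_sign)
--     # walk from md_sign to end_sign (inclusive)
--     block1 = []
--     i = midx
--     while True:
--         block1.append(seq[i])
--         if seq[i] == end_sign:
--             break
--         i = (i + 1) % n
--     # then from restart onward
--     block2 = []
--     i = seq.index(restart)
--     while len(block1) + len(block2) < count: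
--         block2.append(seq[i])
--         i = (i + 1) % n
--     out = (block1 + block2)[:count]
--     return out
-- ===== SOURCE B (Python) =====
-- def _kcd_ad_order(seq: list[str], md_sign: str, group_key: str, deha: str, jeeva: str, count: int = 8) -> list[str]:
--     """Build Antardasa (or Pratyantara) order of 'count' signs, by rotating and slicing."""
--     is_savya = group_key.startswith("S")
--     end_sign = jeeva if is_savya else deha
--     restart = deha if is_savya else jeeva
--     rot = seq[seq.index(md_sign):] + seq[:seq.index(md_sign)]
--     block1 = rot[:rot.index(end_sign) + 1]
--     ridx = seq.index(restart)
--     need = count - len(block1)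
--     if need > 0:
--         rot2 = seq[ridx:] + seq[:ridx]
--         reps = -(-need // len(seq))
--         block2 = (rot2 * reps)[:need]
--     else:
--         block2 = []
--     return (block1 + block2)[:count]
-- ===== Notes on version B (the rewrite author's own statement) =====
-- stated objective: alternative
-- what changed: A walks the cycle element by element with modular index updates and break/while-condition loops; B rotates the list once at each start index and obtains both blocks by closed-form slicing (rot[:rot.index(end)+1] and (rot2*reps)[:need]) with no element-wise walk.
import Mathlib
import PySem

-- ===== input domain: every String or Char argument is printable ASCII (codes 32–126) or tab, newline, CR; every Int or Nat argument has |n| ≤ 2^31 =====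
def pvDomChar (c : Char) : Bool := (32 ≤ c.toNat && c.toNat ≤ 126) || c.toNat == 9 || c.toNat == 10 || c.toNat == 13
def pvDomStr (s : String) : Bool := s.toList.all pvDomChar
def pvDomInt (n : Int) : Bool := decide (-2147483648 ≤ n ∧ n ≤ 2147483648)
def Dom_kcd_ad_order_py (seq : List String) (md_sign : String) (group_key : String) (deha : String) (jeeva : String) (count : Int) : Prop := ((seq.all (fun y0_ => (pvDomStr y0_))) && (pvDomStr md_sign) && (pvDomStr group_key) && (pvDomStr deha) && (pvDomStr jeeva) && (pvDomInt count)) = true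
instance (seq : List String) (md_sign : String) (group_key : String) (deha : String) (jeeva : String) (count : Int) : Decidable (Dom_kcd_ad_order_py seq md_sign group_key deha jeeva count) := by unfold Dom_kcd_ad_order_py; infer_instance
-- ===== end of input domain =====

-- B replaces A's element-by-element modular walks by rotate-once-and-slice closed forms; alternative decomposition, same cost.

-- ===== PORT A =====
-- A's first while-True loop: append seq[i], break when it equals end_sign, else i = (i+1) % n.
-- Fuel-based (fuel n suffices whenever end_sign ∈ seq, which Pre_ guarantees; fuel exhaustion is unreachable there).
def pvWalk1 (seq : List String) (endS : String) (n : Nat) : Nat → Nat → List String → List String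
  | 0, _, acc => acc
  | f+1, i, acc =>
    let x := seq.getD i ""
    if x = endS then acc ++ [x]
    else pvWalk1 seq endS n f ((i + 1) % n) (acc ++ [x])

-- A's second loop: while len(block1)+len(block2) < count: append seq[i]; i = (i+1) % n.
-- Fuel (count - len1).toNat is exactly the number of iterations the Python condition allows.
def pvWalk2 (seq : List String) (n : Nat) (count : Int) (len1 : Nat) : Nat → Nat → List String → List String
  | 0, _, acc => acc
  | f+1, i, acc =>
    if ((len1 : Int) + acc.length) < count then
      pvWalk2 seq n count len1 f ((i + 1) % n) (acc ++ [seq.getD i ""])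
    else acc

def kcd_ad_order_py (seq : List String) (md_sign : String) (group_key : String) (deha : String) (jeeva : String) (count : Int) : List String :=
  let n := seq.length
  match PySem.List.index? seq md_sign with
  | none => []   -- seq.index raises ValueError: excluded by Pre_
  | some midx =>
    let is_savya := PySem.Str.startswith group_key "S"
    let endS := if is_savya then jeeva else deha
    let restart := if is_savya then deha else jeeva
    match PySem.List.index? seq endS with
    | none => []   -- ValueError: excluded by Pre_
    | some _eidx =>
      let block1 := pvWalk1 seq endS n n midx []
      match PySem.List.index? seq restart with
      | none => []   -- ValueError: excluded by Pre_
      | some ridx =>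
        let block2 := pvWalk2 seq n count block1.length ((count - (block1.length : Int)).toNat) ridx []
        PySem.List.slice (block1 ++ block2) none (some count)

-- ===== PORT B =====
-- seq[midx:] + seq[:midx] with 0 ≤ midx ≤ len is exactly drop/take; (rot2 * reps)[:need] with need ≥ 0 is
-- exactly flatten (replicate reps rot2) |>.take need.toNat; -(-need // len) is Python ceiling division.
def kcd_ad_order_py_alt (seq : List String) (md_sign : String) (group_key : String) (deha : String) (jeeva : String) (count : Int) : List String :=
  let is_savya := PySem.Str.startswith group_key "S"
  let endS := if is_savya then jeeva else deha
  let restart := if is_savya then deha else jeeva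
  match PySem.List.index? seq md_sign with
  | none => []   -- ValueError: excluded by Pre_
  | some midx =>
    let rot := seq.drop midx ++ seq.take midx
    match PySem.List.index? rot endS with
    | none => []   -- ValueError: excluded by Pre_
    | some e =>
      let block1 := rot.take (e + 1)
      match PySem.List.index? seq restart with
      | none => []   -- ValueError: excluded by Pre_
      | some ridx =>
        let need : Int := count - (block1.length : Int)
        let block2 :=
          if 0 < need then
            let rot2 := seq.drop ridx ++ seq.take ridx
            let reps := (-(PySem.Int.floordiv (-need) (seq.length : Int))).toNat
            ((List.replicate reps rot2).flatten).take need.toNat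
          else []
        PySem.List.slice (block1 ++ block2) none (some count)

-- ===== PRECONDITION & SPEC =====
-- Pre_ excludes exactly the inputs where A raises ValueError: md_sign, the group's end sign, or the restart
-- sign absent from seq (B raises there too).
def Pre_kcd_ad_order_py (seq : List String) (md_sign : String) (group_key : String) (deha : String) (jeeva : String) (count : Int) : Prop :=
  md_sign ∈ seq ∧
  (if PySem.Str.startswith group_key "S" then jeeva else deha) ∈ seq ∧
  (if PySem.Str.startswith group_key "S" then deha else jeeva) ∈ seq
instance (seq : List String) (md_sign : String) (group_key : String) (deha : String) (jeeva : String) (count : Int) : Decidable (Pre_kcd_ad_order_py seq md_sign group_key deha jeeva count) := by unfold Pre_kcd_ad_order_py; infer_instance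

def pvWitness_kcd_ad_order_py : List String × String × String × String × String × Int :=
  (["Ar", "Ta", "Ge", "Cn"], "Ta", "Savya", "Cn", "Ar", 8)

def Spec_kcd_ad_order_py (seq : List String) (md_sign : String) (group_key : String) (deha : String) (jeeva : String) (count : Int) (out : List String) : Prop := out = kcd_ad_order_py_alt seq md_sign group_key deha jeeva count
instance (seq : List String) (md_sign : String) (group_key : String) (deha : String) (jeeva : String) (count : Int) (out : List String) : Decidable (Spec_kcd_ad_order_py seq md_sign group_key deha jeeva count out) := by unfold Spec_kcd_ad_order_py; infer_instance

-- ===== CLAIM (what is proved, stated in full; the proofs are below) =====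
def Claim_equal_kcd_ad_order_py : Prop := ∀ (seq : List String) (md_sign : String) (group_key : String) (deha : String) (jeeva : String) (count : Int), Dom_kcd_ad_order_py seq md_sign group_key deha jeeva count → Pre_kcd_ad_order_py seq md_sign group_key deha jeeva count → Spec_kcd_ad_order_py seq md_sign group_key deha jeeva count (kcd_ad_order_py seq md_sign group_key deha jeeva count)

-- ===== LEMMAS AND PROOFS =====

theorem pvWitness_ok :
    Dom_kcd_ad_order_py (pvWitness_kcd_ad_order_py.1) (pvWitness_kcd_ad_order_py.2.1) (pvWitness_kcd_ad_order_py.2.2.1) (pvWitness_kcd_ad_order_py.2.2.2.1) (pvWitness_kcd_ad_order_py.2.2.2.2.1) (pvWitness_kcd_ad_order_py.2.2.2.2.2) ∧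
    Pre_kcd_ad_order_py (pvWitness_kcd_ad_order_py.1) (pvWitness_kcd_ad_order_py.2.1) (pvWitness_kcd_ad_order_py.2.2.1) (pvWitness_kcd_ad_order_py.2.2.2.1) (pvWitness_kcd_ad_order_py.2.2.2.2.1) (pvWitness_kcd_ad_order_py.2.2.2.2.2) := by
  decide

-- rotation of seq at index i, written as drop/take; its cons and step facts
theorem pv_rot_cons (seq : List String) (i : Nat) (h : i < seq.length) :
    seq.drop i ++ seq.take i = seq.getD i "" :: (seq.drop (i+1) ++ seq.take i) := by
  rw [List.drop_eq_getElem_cons h, List.getD_eq_getElem seq "" h]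
  rfl

theorem pv_take_succ_eq (seq : List String) (i : Nat) (h : i < seq.length) :
    seq.take (i+1) = seq.take i ++ [seq.getD i ""] := by
  rw [List.getD_eq_getElem seq "" h]
  exact List.take_succ_eq_append_getElem h

theorem pv_rot_next (seq : List String) (i : Nat) (h : i < seq.length) :
    seq.drop ((i+1) % seq.length) ++ seq.take ((i+1) % seq.length)
      = (seq.drop (i+1) ++ seq.take i) ++ [seq.getD i ""] := by
  rcases Nat.lt_or_ge (i+1) seq.length with h1 | h1
  · rw [Nat.mod_eq_of_lt h1, pv_take_succ_eq seq i h, List.append_assoc]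
  · have he : i + 1 = seq.length := by omega
    rw [he, Nat.mod_self]
    simp only [List.drop_zero, List.take_zero, List.append_nil, List.drop_length, List.nil_append]
    rw [← pv_take_succ_eq seq i h, he, List.take_length]

theorem pv_walk1_eq (seq : List String) (endS : String) :
    ∀ (e i f : Nat) (acc : List String), i < seq.length →
    PySem.List.index? (seq.drop i ++ seq.take i) endS = some e → e + 1 ≤ f →
    pvWalk1 seq endS seq.length f i acc = acc ++ (seq.drop i ++ seq.take i).take (e+1) := by
  intro e
  induction e with
  | zero =>
    intro i f acc hi hidx hf
    obtain ⟨hk, hkv, _⟩ := PySem.List.getElem_of_index?_eq_some hidx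
    obtain ⟨f', rfl⟩ : ∃ f', f = f' + 1 := ⟨f - 1, by omega⟩
    have hcons := pv_rot_cons seq i hi
    have hx : seq.getD i "" = endS := by
      simp only [hcons, List.getElem_cons_zero] at hkv; exact hkv
    have hx' : seq[i]?.getD "" = endS := by simpa [List.getD] using hx
    rw [hcons]
    have htake : List.take (0+1) (seq.getD i "" :: (seq.drop (i+1) ++ seq.take i)) = [seq.getD i ""] := rfl
    rw [htake]
    simp [pvWalk1, hx']
  | succ e ih =>
    intro i f acc hi hidx hf
    have hcons := pv_rot_cons seq i hi
    have hlen : e + 1 < (seq.drop i ++ seq.take i).length := by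
      obtain ⟨hk, _, _⟩ := PySem.List.getElem_of_index?_eq_some hidx
      exact hk
    have hlenrot : (seq.drop i ++ seq.take i).length = seq.length := by
      simp; omega
    -- head is not endS
    obtain ⟨hk, hkv, hprev⟩ := PySem.List.getElem_of_index?_eq_some hidx
    have hne : seq.getD i "" ≠ endS := by
      have h0 : (seq.drop i ++ seq.take i)[0]'(by omega) ≠ endS := hprev 0 (by omega)
      simp only [hcons, List.getElem_cons_zero] at h0
      exact h0
    -- index? of the tail
    rw [hcons] at hidx
    rw [PySem.List.index?_cons_of_ne _ hne] at hidx
    have htail : PySem.List.index? (seq.drop (i+1) ++ seq.take i) endS = some e := by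
      rcases h' : PySem.List.index? (seq.drop (i+1) ++ seq.take i) endS with _ | k
      · rw [h'] at hidx; simp at hidx
      · rw [h'] at hidx; simp at hidx; exact congrArg some (by omega)
    have hmem : endS ∈ seq.drop (i+1) ++ seq.take i :=
      (PySem.List.index?_isSome_iff _ _).mp (by rw [htail]; rfl)
    have hnext : PySem.List.index? (seq.drop ((i+1) % seq.length) ++ seq.take ((i+1) % seq.length)) endS = some e := by
      rw [pv_rot_next seq i hi, PySem.List.index?_append_of_mem _ hmem, htail]
    have hn : 0 < seq.length := by omega
    have hi' : (i+1) % seq.length < seq.length := Nat.mod_lt _ hn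
    obtain ⟨f', rfl⟩ : ∃ f', f = f' + 1 := ⟨f - 1, by omega⟩
    have hne' : seq[i]?.getD "" ≠ endS := by simpa [List.getD] using hne
    have step : pvWalk1 seq endS seq.length (f' + 1) i acc
        = pvWalk1 seq endS seq.length f' ((i + 1) % seq.length) (acc ++ [seq.getD i ""]) := by
      simp [pvWalk1, List.getD, hne']
    rw [step, ih ((i+1) % seq.length) f' (acc ++ [seq.getD i ""]) hi' hnext (by omega)]
    -- list algebra: acc ++ [x] ++ rot'.take (e+1) = acc ++ rot.take (e+2)
    rw [hcons, pv_rot_next seq i hi]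
    have htlen : e + 1 ≤ (seq.drop (i+1) ++ seq.take i).length := by
      rw [hcons] at hlen; simp at hlen
      simp; omega
    rw [List.take_append_of_le_length htlen]
    simp [List.take_succ_cons]

-- A's second loop, with the fuel = remaining-count invariant, equals the plain cyclic collector
def pvCycTake (seq : List String) (n : Nat) : Nat → Nat → List String
  | 0, _ => []
  | k+1, i => seq.getD i "" :: pvCycTake seq n k ((i+1) % n)

theorem pv_walk2_eq (seq : List String) (n : Nat) (count : Int) (len1 : Nat) :
    ∀ (f : Nat) (i : Nat) (acc : List String),
    (len1 : Int) + acc.length + f = count →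
    pvWalk2 seq n count len1 f i acc = acc ++ pvCycTake seq n f i := by
  intro f
  induction f with
  | zero => intro i acc _; simp [pvWalk2, pvCycTake]
  | succ f ih =>
    intro i acc hinv
    have hcond : ((len1 : Int) + acc.length) < count := by omega
    have : pvWalk2 seq n count len1 (f+1) i acc
        = pvWalk2 seq n count len1 f ((i+1) % n) (acc ++ [seq.getD i ""]) := by
      simp [pvWalk2, hcond]
    rw [this, ih ((i+1) % n) (acc ++ [seq.getD i ""]) (by simp; omega)]
    simp [pvCycTake]

-- (t ++ [x]) repeated m+1 times = t ++ (x :: t) repeated m times ++ [x]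
theorem pv_flatten_replicate_rot (t : List String) (x : String) :
    ∀ m : Nat, (List.replicate (m+1) (t ++ [x])).flatten
      = t ++ (List.replicate m (x :: t)).flatten ++ [x] := by
  intro m
  induction m with
  | zero => simp
  | succ m ih =>
    rw [List.replicate_succ, List.flatten_cons, ih]
    rw [show List.replicate (m+1) (x :: t) = (x :: t) :: List.replicate m (x :: t) from List.replicate_succ ..]
    simp

theorem pv_cycTake_eq (seq : List String) :
    ∀ (k i m : Nat), i < seq.length → k ≤ m * seq.length →
    pvCycTake seq seq.length k i = ((List.replicate m (seq.drop i ++ seq.take i)).flatten).take k := by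
  intro k
  induction k with
  | zero => intro i m _ _; simp [pvCycTake]
  | succ k ih =>
    intro i m hi hk
    obtain ⟨m', rfl⟩ : ∃ m', m = m' + 1 := by
      rcases m with _ | m'
      · omega
      · exact ⟨m', rfl⟩
    have hn : 0 < seq.length := by omega
    have hi' : (i+1) % seq.length < seq.length := Nat.mod_lt _ hn
    have hcons := pv_rot_cons seq i hi
    -- RHS head
    have hrhs : (List.replicate (m'+1) (seq.drop i ++ seq.take i)).flatten
        = seq.getD i "" :: ((seq.drop (i+1) ++ seq.take i) ++ (List.replicate m' (seq.drop i ++ seq.take i)).flatten) := by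
      rw [List.replicate_succ, List.flatten_cons, hcons]; simp
    rw [hrhs]
    simp only [List.take_succ_cons, pvCycTake]
    congr 1
    rw [ih ((i+1) % seq.length) (m'+1) hi' (by omega)]
    rw [pv_rot_next seq i hi]
    rw [pv_flatten_replicate_rot (seq.drop (i+1) ++ seq.take i) (seq.getD i "") m']
    rw [← hcons]
    have hulen : k ≤ ((seq.drop (i+1) ++ seq.take i) ++ (List.replicate m' (seq.drop i ++ seq.take i)).flatten).length := by
      have h1 : ((List.replicate m' (seq.drop i ++ seq.take i)).flatten).length
          = m' * (seq.drop i ++ seq.take i).length := by simp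
      have h2 : (seq.drop i ++ seq.take i).length = seq.length := by simp; omega
      rw [List.length_append, h1, h2, List.length_append, List.length_drop, List.length_take]
      have : min i seq.length = i := by omega
      rw [this]
      have hmul : (m' + 1) * seq.length = m' * seq.length + seq.length := by ring
      omega
    rw [List.append_assoc, ← List.append_assoc]
    rw [List.take_append_of_le_length hulen]

-- ceiling-division bound for B's reps
theorem pv_reps_bound (need : Int) (n : Nat) (hneed : 0 < need) (hn : 0 < n) :
    need.toNat ≤ (-(PySem.Int.floordiv (-need) (n : Int))).toNat * n := by
  set q : Int := -(PySem.Int.floordiv (-need) (n : Int)) with hq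
  have hiff := (PySem.Int.neg_floordiv_neg_eq_iff_of_pos (a := need) (b := (n : Int)) (q := q)
    (by exact_mod_cast hn)).mp hq.symm
  obtain ⟨hlb, hub⟩ := hiff
  have hq1 : 1 ≤ q := by nlinarith [hub, hlb]
  have hcast : (q.toNat : Int) = q := Int.toNat_of_nonneg (by omega)
  have : (need.toNat : Int) ≤ (q.toNat : Int) * (n : Int) := by
    rw [hcast, Int.toNat_of_nonneg (by omega)]; exact hub
  exact_mod_cast this

-- membership transfers from seq to any rotation of seq
theorem pv_mem_rot (seq : List String) (v : String) (i : Nat) (h : v ∈ seq) :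
    v ∈ seq.drop i ++ seq.take i := by
  rw [List.mem_append, or_comm, ← List.mem_append, List.take_append_drop]
  exact h

-- ===== VERDICT (by name: the statement is the Claim_ definition above) =====
theorem kcd_ad_order_py_spec : Claim_equal_kcd_ad_order_py := by
  intro seq md_sign group_key deha jeeva count _hdom hpre
  obtain ⟨hmd, hend, hres⟩ := hpre
  unfold Spec_kcd_ad_order_py kcd_ad_order_py kcd_ad_order_py_alt
  rcases h1 : PySem.List.index? seq md_sign with _ | midx
  · exact absurd hmd ((PySem.List.index?_eq_none_iff _ _).mp h1)
  obtain ⟨hmidx, -, -⟩ := PySem.List.getElem_of_index?_eq_some h1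
  have hn : 0 < seq.length := by omega
  rcases h2 : PySem.List.index? seq (if PySem.Str.startswith group_key "S" then jeeva else deha) with _ | eidx
  · exact absurd hend ((PySem.List.index?_eq_none_iff _ _).mp h2)
  rcases he : PySem.List.index? (seq.drop midx ++ seq.take midx) (if PySem.Str.startswith group_key "S" then jeeva else deha) with _ | e
  · exact absurd (pv_mem_rot seq _ midx hend) ((PySem.List.index?_eq_none_iff _ _).mp he)
  obtain ⟨hke, -, -⟩ := PySem.List.getElem_of_index?_eq_some he
  have hrotlen : (seq.drop midx ++ seq.take midx).length = seq.length := by simp; omega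
  rcases h3 : PySem.List.index? seq (if PySem.Str.startswith group_key "S" then deha else jeeva) with _ | ridx
  · exact absurd hres ((PySem.List.index?_eq_none_iff _ _).mp h3)
  obtain ⟨hridx, -, -⟩ := PySem.List.getElem_of_index?_eq_some h3
  simp only [h2, h3, he]
  have hb1 := pv_walk1_eq seq (if PySem.Str.startswith group_key "S" then jeeva else deha) e midx seq.length [] hmidx he (by omega)
  rw [List.nil_append] at hb1
  rw [hb1]
  set block1 := (seq.drop midx ++ seq.take midx).take (e+1) with hB1
  have h4 : pvWalk2 seq seq.length count block1.length ((count - (block1.length : Int)).toNat) ridx []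
      = (if 0 < count - (block1.length : Int) then
          ((List.replicate ((-(PySem.Int.floordiv (-(count - (block1.length : Int))) (seq.length : Int))).toNat)
            (seq.drop ridx ++ seq.take ridx)).flatten).take (count - (block1.length : Int)).toNat
        else []) := by
    rcases le_or_gt count (block1.length : Int) with hc | hc
    · have hf0 : (count - (block1.length : Int)).toNat = 0 := by omega
      rw [hf0, if_neg (by omega)]
      rfl
    · have hneedpos : 0 < count - (block1.length : Int) := by omega
      rw [if_pos hneedpos]
      have hinv : (block1.length : Int) + (([] : List String)).length + (count - (block1.length : Int)).toNat = count := by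
        simp; omega
      rw [pv_walk2_eq seq seq.length count block1.length (count - (block1.length : Int)).toNat ridx [] hinv]
      rw [pv_cycTake_eq seq (count - (block1.length : Int)).toNat ridx _ hridx
        (pv_reps_bound (count - (block1.length : Int)) seq.length hneedpos hn)]
      rfl
  rw [h4]
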